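-- pv_equiv track=rewrite | github.com/egoughnour/curate-ipsum | graph/kameda.py | _compute_ranks_heuristic
-- ===== SOURCE A (Python) =====
-- def _compute_ranks_heuristic(
--     forward: dict[str, list[str]],
--     backward: dict[str, list[str]],
--     all_ids: frozenset[str],
--     topo_order: list[str],
-- ) -> tuple[dict[str, int], dict[str, int]]:
--     """
--     Compute left and right ranks without a planar embedding.
--
--     Uses two topological orderings as an approximation:
--     - Forward topological order (standard)
--     - Reverse topological order (processing sinks first)
--
--     This is correct for trees and provides a reasonable approximation
--     for general DAGs, though it may produce false positives for
--     non-planar DAGs.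
--     """
--     # Forward ordering: standard topological rank
--     left_rank: dict[str, int] = {}
--     for i, nid in enumerate(topo_order):
--         left_rank[nid] = i
--
--     # Alternative ordering: among nodes at the same topological level,
--     # reverse their relative order. This creates a second "perspective."
--     # Compute level (longest path from source)
--     level: dict[str, int] = dict.fromkeys(all_ids, 0)
--     for nid in topo_order:
--         for succ in forward.get(nid, []):
--             if succ in level:
--                 level[succ] = max(level[succ], level[nid] + 1)
--
--     # Group by level, reverse within each level
--     by_level: dict[int, list[str]] = {}
--     for nid in topo_order:
--         lv = level[nid]
--         by_level.setdefault(lv, []).append(nid)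
--
--     right_order: list[str] = []
--     for lv in sorted(by_level.keys()):
--         right_order.extend(reversed(by_level[lv]))
--
--     right_rank: dict[str, int] = {}
--     for i, nid in enumerate(right_order):
--         right_rank[nid] = i
--
--     return left_rank, right_rank
-- ===== SOURCE B (Python) =====
-- def _compute_ranks_heuristic(
--     forward,
--     backward,
--     all_ids,
--     topo_order,
-- ):
--     # Forward ordering: standard topological rank.
--     left_rank = {nid: i for i, nid in enumerate(topo_order)}
--
--     # Level = longest path from a source (same recurrence as the original).
--     level = dict.fromkeys(all_ids, 0)
--     for nid in topo_order:
--         for succ in forward.get(nid, []):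
--             if succ in level:
--                 level[succ] = max(level[succ], level[nid] + 1)
--
--     # One stable sort of the enumerated positions replaces the group-by-level
--     # dict, the sorted(keys) loop and the per-level reversed concatenation:
--     # ascending level, and within a level descending position.
--     right_order = [
--         nid
--         for _, nid in sorted(enumerate(topo_order), key=lambda p: (level[p[1]], -p[0]))
--     ]
--     right_rank = {nid: i for i, nid in enumerate(right_order)}
--
--     return left_rank, right_rank
-- ===== Notes on version B (the rewrite author's own statement) =====
-- stated objective: simpler
-- what changed: The by_level grouping dict, the sorted(by_level.keys()) loop and the per-level reversed concatenation are replaced by one stable sort of the enumerated topo_order keyed by (level, -position); left_rank and the longest-path level recurrence are unchanged.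
import Mathlib
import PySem

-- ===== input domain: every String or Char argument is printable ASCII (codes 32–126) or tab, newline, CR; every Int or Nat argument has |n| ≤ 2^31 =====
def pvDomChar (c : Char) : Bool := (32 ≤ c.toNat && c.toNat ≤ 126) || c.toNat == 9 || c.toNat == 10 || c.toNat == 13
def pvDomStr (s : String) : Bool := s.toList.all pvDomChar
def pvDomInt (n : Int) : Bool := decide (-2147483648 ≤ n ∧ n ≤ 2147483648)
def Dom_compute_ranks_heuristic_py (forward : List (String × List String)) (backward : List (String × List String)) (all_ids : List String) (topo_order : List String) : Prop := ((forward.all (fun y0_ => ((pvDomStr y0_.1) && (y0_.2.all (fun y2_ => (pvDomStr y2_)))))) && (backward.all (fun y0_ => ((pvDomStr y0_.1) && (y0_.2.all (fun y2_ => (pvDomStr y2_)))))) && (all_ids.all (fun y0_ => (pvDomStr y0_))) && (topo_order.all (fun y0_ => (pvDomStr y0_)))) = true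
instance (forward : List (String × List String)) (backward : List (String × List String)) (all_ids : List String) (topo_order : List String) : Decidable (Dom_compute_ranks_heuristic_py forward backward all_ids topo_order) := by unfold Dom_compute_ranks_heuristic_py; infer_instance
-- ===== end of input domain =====

-- B replaces A's by-level grouping + sorted(keys) + per-level reversed concatenation by ONE stable
-- sort of the enumerated topo_order keyed by (level, -position); left_rank and the level recurrence stay.
-- Side effects: none (no argument is mutated).

-- ===== PORT A =====
-- helper (both Pythons contain this loop): 'd = {}; for i, nid in enumerate(xs): d[nid] = i'
def pvRankDict (xs : List String) : PySem.Dict String Int :=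
  (PySem.List.enumerate xs).foldl (fun d p => d.insert p.2 p.1) PySem.Dict.empty

-- helper (identical in both Pythons): level = dict.fromkeys(all_ids, 0) then the relaxation loop.
-- 'level[nid]' is ported as getD nid 0: under Pre_ every nid of topo_order is a key of level, so no KeyError.
def pvLevelDict (forward : List (String × List String)) (all_ids : List String)
    (topo_order : List String) : PySem.Dict String Int :=
  topo_order.foldl
    (fun lvl nid =>
      ((PySem.Dict.mk forward).getD nid []).foldl
        (fun lvl succ =>
          if lvl.contains succ then
            lvl.insert succ (max (lvl.getD succ 0) (lvl.getD nid 0 + 1))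
          else lvl)
        lvl)
    (all_ids.foldl (fun d k => d.insert k (0 : Int)) PySem.Dict.empty)

-- A's grouping loop: by_level.setdefault(level[nid], []).append(nid)  ==  modify lv [] (· ++ [nid])
def pvByLevel (level : PySem.Dict String Int) (topo_order : List String) :
    PySem.Dict Int (List String) :=
  topo_order.foldl (fun d nid => d.modify (level.getD nid 0) [] (fun g => g ++ [nid]))
    PySem.Dict.empty

-- A's concatenation loop: for lv in sorted(by_level.keys()): right_order.extend(reversed(by_level[lv]))
def pvRightOrderA (level : PySem.Dict String Int) (topo_order : List String) : List String :=
  (PySem.List.sorted (pvByLevel level topo_order).keys (fun x => x) false).foldl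
    (fun acc lv => acc ++ ((pvByLevel level topo_order).getD lv []).reverse) []

def compute_ranks_heuristic_py (forward : List (String × List String))
    (backward : List (String × List String)) (all_ids : List String)
    (topo_order : List String) : (List (String × Int)) × (List (String × Int)) :=
  ((pvRankDict topo_order).items,
    (pvRankDict (pvRightOrderA (pvLevelDict forward all_ids topo_order) topo_order)).items)

-- ===== PORT B =====
-- B's single sort: [nid for _, nid in sorted(enumerate(topo_order), key=lambda p: (level[p[1]], -p[0]))]
def pvRightOrderB (level : PySem.Dict String Int) (topo_order : List String) : List String :=
  (PySem.List.sorted2 (PySem.List.enumerate topo_order) (fun p => level.getD p.2 0)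
      (fun p => -p.1) false).map (fun p => p.2)

def compute_ranks_heuristic_py_alt (forward : List (String × List String))
    (backward : List (String × List String)) (all_ids : List String)
    (topo_order : List String) : (List (String × Int)) × (List (String × Int)) :=
  ((pvRankDict topo_order).items,
    (pvRankDict (pvRightOrderB (pvLevelDict forward all_ids topo_order) topo_order)).items)

-- ===== PRECONDITION & SPEC =====
-- Pre_ excludes exactly the inputs where some node of topo_order is not in all_ids: there A (and B)
-- raises KeyError at 'level[nid]'.
def Pre_compute_ranks_heuristic_py (forward : List (String × List String))
    (backward : List (String × List String)) (all_ids : List String)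
    (topo_order : List String) : Prop :=
  ∀ nid ∈ topo_order, nid ∈ all_ids
instance (forward : List (String × List String)) (backward : List (String × List String)) (all_ids : List String) (topo_order : List String) : Decidable (Pre_compute_ranks_heuristic_py forward backward all_ids topo_order) := by unfold Pre_compute_ranks_heuristic_py; infer_instance

def pvWitness_compute_ranks_heuristic_py :
    (List (String × List String)) × (List (String × List String)) × List String × List String :=
  ([("a", ["b"])], [], ["a", "b"], ["a", "b"])

def Spec_compute_ranks_heuristic_py (forward : List (String × List String)) (backward : List (String × List String)) (all_ids : List String) (topo_order : List String) (out : (List (String × Int)) × (List (String × Int))) : Prop := out = compute_ranks_heuristic_py_alt forward backward all_ids topo_order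
instance (forward : List (String × List String)) (backward : List (String × List String)) (all_ids : List String) (topo_order : List String) (out : (List (String × Int)) × (List (String × Int))) : Decidable (Spec_compute_ranks_heuristic_py forward backward all_ids topo_order out) := by unfold Spec_compute_ranks_heuristic_py; infer_instance

-- ===== CLAIM (what is proved, stated in full; the proofs are below) =====
def Claim_equal_compute_ranks_heuristic_py : Prop := ∀ (forward : List (String × List String)) (backward : List (String × List String)) (all_ids : List String) (topo_order : List String), Dom_compute_ranks_heuristic_py forward backward all_ids topo_order → Pre_compute_ranks_heuristic_py forward backward all_ids topo_order → Spec_compute_ranks_heuristic_py forward backward all_ids topo_order (compute_ranks_heuristic_py forward backward all_ids topo_order)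

-- ===== LEMMAS AND PROOFS =====

-- A's by_level dict, characterised: the group of lv is the level-lv slice of topo_order, and the
-- keys are the distinct levels in first-occurrence order.
theorem pvByLevel_getD (level : PySem.Dict String Int) (topo : List String) (lv : Int) :
    (pvByLevel level topo).getD lv [] = topo.filter (fun n => level.getD n 0 == lv) := by
  have h := PySem.Dict.getD_foldl_modify_append (topo.map (fun n => (level.getD n 0, n)))
    PySem.Dict.empty lv
  rw [List.foldl_map] at h
  simp only [List.filter_map, Function.comp_def, List.map_map] at h
  simpa [pvByLevel, show (PySem.Dict.empty : PySem.Dict Int (List String)).getD lv [] = []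
    from rfl] using h

theorem pvByLevel_keys (level : PySem.Dict String Int) (topo : List String) :
    (pvByLevel level topo).keys = PySem.Set.ofList (topo.map (fun n => level.getD n 0)) := by
  rw [pvByLevel, PySem.Dict.keys_foldl_modify_key topo (fun n => level.getD n 0) []
    (fun _ nid => fun g => g ++ [nid])]
  rfl

-- Python's composite key (k1, k2) compared lexicographically = sorting by toLex.
theorem sorted2_eq_sorted_lex {A : Type} (xs : List A) (k1 k2 : A → Int) :
    PySem.List.sorted2 xs k1 k2 false
      = PySem.List.sorted xs (fun x => toLex (k1 x, k2 x)) false := by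
  rw [PySem.List.sorted_eq_foldl_insertBy]
  have hb : (fun a b => decide (k1 a < k1 b) || (!decide (k1 b < k1 a) && decide (k2 a < k2 b)))
      = (fun a b => decide (toLex (k1 a, k2 a) < toLex (k1 b, k2 b))) := by
    funext a b
    rcases lt_trichotomy (k1 a) (k1 b) with h | h | h <;>
      simp [Prod.Lex.toLex_lt_toLex, h, not_lt_of_gt]
  unfold PySem.List.sorted2
  rw [hb]
  simp

-- Concatenating, over a duplicate-free list of keys, the key-filtered slices of xs permutes the
-- part of xs whose key lies in the key list.
theorem flatMap_filter_perm {A : Type} (key : A → Int) (xs : List A) :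
    ∀ (ls : List Int), ls.Nodup →
      (ls.flatMap (fun lv => (xs.filter (fun n => key n == lv)).reverse)).Perm
        (xs.filter (fun n => decide (key n ∈ ls))) := by
  intro ls
  induction ls with
  | nil => simp
  | cons l ls ih =>
    intro hnd
    rw [List.nodup_cons] at hnd
    refine List.Perm.trans ?_ (List.filter_append_perm (fun n => key n == l) _)
    rw [List.flatMap_cons, List.filter_filter, List.filter_filter]
    refine List.Perm.append ?_ ?_
    · exact (List.reverse_perm _).trans
        (List.Perm.of_eq (List.filter_congr (by
          intro n _; by_cases h : key n = l <;> simp [h])))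
    · refine (ih hnd.2).trans (List.Perm.of_eq (List.filter_congr ?_))
      intro n _
      by_cases h : key n = l <;> simp [h, hnd.1]

-- B's sort of the enumerated positions equals A's grouped-and-reversed concatenation.
theorem sorted2_enum_eq_grouped (topo : List String) (key : String → Int) :
    (PySem.List.sorted2 (PySem.List.enumerate topo) (fun p => key p.2) (fun p => -p.1)
        false).map (fun p => p.2)
      = (PySem.List.sorted (PySem.Set.ofList (topo.map key)) (fun x => x) false).flatMap
          (fun lv => (topo.filter (fun n => key n == lv)).reverse) := by
  have hSperm : (PySem.List.sorted (PySem.Set.ofList (topo.map key)) (fun x => x) false).Perm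
      (PySem.Set.ofList (topo.map key)) := PySem.List.sorted_perm _ _ _
  have hSnd : (PySem.List.sorted (PySem.Set.ofList (topo.map key)) (fun x => x) false).Nodup :=
    hSperm.nodup_iff.mpr (PySem.Set.nodup_ofList _)
  have hSlt : (PySem.List.sorted (PySem.Set.ofList (topo.map key)) (fun x => x) false).Pairwise
      (fun a b => a < b) := PySem.List.sorted_ofList_pairwise_lt _
  have hmemS : ∀ p ∈ PySem.List.enumerate topo,
      key p.2 ∈ PySem.List.sorted (PySem.Set.ofList (topo.map key)) (fun x => x) false := by
    intro p hp
    have hsnd : p.2 ∈ topo := by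
      have h1 : p.2 ∈ (PySem.List.enumerate topo).map (fun q => q.2) :=
        List.mem_map.mpr ⟨p, hp, rfl⟩
      rwa [PySem.List.map_snd_enumerate] at h1
    exact hSperm.mem_iff.mpr ((PySem.Set.mem_ofList _ _).mpr (List.mem_map.mpr ⟨p.2, hsnd, rfl⟩))
  -- first: the sorted enumerated list equals the per-level reversed enumerated groups
  have hmain : PySem.List.sorted2 (PySem.List.enumerate topo) (fun p => key p.2) (fun p => -p.1)
        false
      = (PySem.List.sorted (PySem.Set.ofList (topo.map key)) (fun x => x) false).flatMap
          (fun lv => ((PySem.List.enumerate topo).filter (fun p => key p.2 == lv)).reverse) := by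
    rw [sorted2_eq_sorted_lex]
    apply PySem.List.sorted_eq_of_perm_of_pairwise_lt
    · refine (flatMap_filter_perm (fun p => key p.2) (PySem.List.enumerate topo) _ hSnd).trans ?_
      refine List.Perm.of_eq (List.filter_eq_self.mpr ?_)
      intro p hp; simpa using hmemS p hp
    · rw [List.flatMap_def, List.pairwise_flatten]
      constructor
      · intro g hg
        rw [List.mem_map] at hg
        obtain ⟨lv, _, rfl⟩ := hg
        rw [List.pairwise_reverse]
        refine List.Pairwise.imp_of_mem ?_
          ((PySem.List.pairwise_lt_enumerate topo 0).filter _)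
        intro p q hp hq hlt
        have hkp : key p.2 = lv := by simpa using (List.of_mem_filter hp)
        have hkq : key q.2 = lv := by simpa using (List.of_mem_filter hq)
        rw [Prod.Lex.toLex_lt_toLex]
        right
        exact ⟨by rw [hkp, hkq], by omega⟩
      · rw [List.pairwise_map]
        refine List.Pairwise.imp_of_mem ?_ hSlt
        intro l1 l2 _ _ hlt x hx y hy
        have hkx : key x.2 = l1 := by
          have := List.of_mem_filter (List.mem_reverse.mp hx); simpa using this
        have hky : key y.2 = l2 := by
          have := List.of_mem_filter (List.mem_reverse.mp hy); simpa using this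
        rw [Prod.Lex.toLex_lt_toLex]
        left
        rw [hkx, hky]; exact hlt
  rw [hmain, List.map_flatMap]
  refine congrArg List.flatten (List.map_eq_map_iff.mpr ?_)
  intro lv _
  rw [List.map_reverse]
  congr 1
  have h2 := List.filter_map (f := fun p : Int × String => p.2)
    (l := PySem.List.enumerate topo) (p := fun n => key n == lv)
  rw [PySem.List.map_snd_enumerate] at h2
  simpa [Function.comp_def] using h2.symm

-- A's whole right_order equals B's, for ANY level dict and any topo_order.
theorem rightOrder_eq (level : PySem.Dict String Int) (topo : List String) :
    pvRightOrderA level topo = pvRightOrderB level topo := by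
  unfold pvRightOrderA pvRightOrderB
  rw [PySem.List.foldl_append_eq_flatMap, List.nil_append, pvByLevel_keys]
  rw [sorted2_enum_eq_grouped topo (fun n => level.getD n 0)]
  rw [List.flatMap_def, List.flatMap_def]
  refine congrArg List.flatten (List.map_eq_map_iff.mpr ?_)
  intro lv _
  rw [pvByLevel_getD]

-- ===== VERDICT (by name: the statement is the Claim_ definition above) =====
theorem compute_ranks_heuristic_py_spec : Claim_equal_compute_ranks_heuristic_py := by
  intro forward backward all_ids topo_order _ _
  unfold Spec_compute_ranks_heuristic_py compute_ranks_heuristic_py compute_ranks_heuristic_py_alt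
  rw [rightOrder_eq (pvLevelDict forward all_ids topo_order) topo_order]
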